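-- pv_equiv track=rewrite | github.com/noahostle/SPEAR | stage_peel_attack.py | sampled_low_score_table_from_decoded
-- ===== SOURCE A (Python) =====
-- from typing import Iterable, List, Sequence, Tuple
--
-- def sampled_output_stage_score_from_decoded(
--     decoded_groups: Sequence[Sequence[Tuple[int, int]]],
--     state_low_guess: int,
-- ) -> int:
--     total = 0
--     for group in decoded_groups:
--         seen = set()
--         for decoded_high, decoded_low in group:
--             borrow = 1 if decoded_low < state_low_guess else 0
--             seen.add((decoded_high - borrow) & 0xFF)
--         total += len(seen)
--     return total
--
-- def sampled_low_score_table_from_decoded(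
--     decoded_groups: Sequence[Sequence[Tuple[int, int]]],
-- ) -> List[Tuple[int, int]]:
--     scores = []
--     for low_guess in range(256):
--         score = sampled_output_stage_score_from_decoded(decoded_groups, low_guess)
--         scores.append((score, low_guess))
--     return scores
-- ===== SOURCE B (Python) =====
-- def _group_table(group):
--     # multiplicity of each masked value at low_guess = 0
--     cnt = {}
--     for high, low in group:
--         v = (high - (1 if low < 0 else 0)) & 0xFF
--         cnt[v] = cnt.get(v, 0) + 1
--     # each element flips its borrow exactly once, at guess = low + 1
--     events = {}
--     for high, low in group:
--         if 0 <= low <= 254: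
--             events.setdefault(low + 1, []).append(high)
--     distinct = len(cnt)
--     table = []
--     for guess in range(256):
--         for high in events.get(guess, []):
--             old = high & 0xFF
--             new = (high - 1) & 0xFF
--             c = cnt.get(old, 0) - 1
--             cnt[old] = c
--             if c == 0:
--                 distinct -= 1
--             cn = cnt.get(new, 0) + 1
--             cnt[new] = cn
--             if cn == 1:
--                 distinct += 1
--         table.append(distinct)
--     return table
--
-- def sampled_low_score_table_from_decoded(decoded_groups):
--     totals = [0] * 256
--     for group in decoded_groups:
--         table = _group_table(group)
--         totals = [t + s for t, s in zip(totals, table)]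
--     return list(zip(totals, range(256)))
-- ===== Notes on version B (the rewrite author's own statement) =====
-- stated objective: faster
-- what changed: Instead of rebuilding every group's distinct-value set from scratch for each of the 256 low guesses, B builds per-group multiplicity counters once, records each element's single borrow-flip event at guess low+1, and sweeps the guesses updating the counters and a running distinct count incrementally.
import Mathlib
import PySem

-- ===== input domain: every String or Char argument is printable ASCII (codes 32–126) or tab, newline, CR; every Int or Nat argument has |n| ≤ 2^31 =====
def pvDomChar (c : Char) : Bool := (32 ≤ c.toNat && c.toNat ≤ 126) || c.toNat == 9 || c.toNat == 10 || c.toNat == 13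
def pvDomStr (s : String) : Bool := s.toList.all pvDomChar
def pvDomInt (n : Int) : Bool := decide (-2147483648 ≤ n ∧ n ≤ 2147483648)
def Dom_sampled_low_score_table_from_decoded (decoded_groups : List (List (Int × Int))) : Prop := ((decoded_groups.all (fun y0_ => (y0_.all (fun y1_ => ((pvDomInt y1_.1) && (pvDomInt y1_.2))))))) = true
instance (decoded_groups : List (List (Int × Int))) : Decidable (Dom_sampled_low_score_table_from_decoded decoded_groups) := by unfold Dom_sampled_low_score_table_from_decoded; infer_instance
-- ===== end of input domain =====

-- B replaces A's 256 full recomputations of every group's distinct-value set by one sweep over the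
-- guesses that processes each element's single borrow-flip event and updates per-group multiplicity
-- counters incrementally (objective: faster).

-- ===== PORT A =====
def sampled_output_stage_score_from_decoded (decoded_groups : List (List (Int × Int))) (state_low_guess : Int) : Int :=
  decoded_groups.foldl (fun total group =>
    let seen : PySem.Set Int := group.foldl (fun seen p =>
      let borrow : Int := if p.2 < state_low_guess then 1 else 0
      PySem.Set.add seen (PySem.Int.band (p.1 - borrow) 255)) PySem.Set.empty
    total + PySem.Set.len seen) 0

def sampled_low_score_table_from_decoded (decoded_groups : List (List (Int × Int))) : List (Int × Int) :=
  (PySem.List.pyRange 0 256 1).foldl (fun scores low_guess =>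
    scores ++ [(sampled_output_stage_score_from_decoded decoded_groups low_guess, low_guess)]) []

-- ===== PORT B =====
-- one borrow-flip event of Source B's inner loop: cnt[old] -= 1, cnt[new] += 1, distinct updated
def pvFlip (st : PySem.Dict Int Int × Int) (high : Int) : PySem.Dict Int Int × Int :=
  let old := PySem.Int.band high 255
  let nw := PySem.Int.band (high - 1) 255
  let c := st.1.getD old 0 - 1
  let cnt := st.1.insert old c
  let distinct := if c = 0 then st.2 - 1 else st.2
  let cn := cnt.getD nw 0 + 1
  (cnt.insert nw cn, if cn = 1 then distinct + 1 else distinct)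

-- Source B: multiplicity of each masked value at low_guess = 0
def pvInitCnt (group : List (Int × Int)) : PySem.Dict Int Int :=
  group.foldl (fun d p =>
    let v := PySem.Int.band (p.1 - (if p.2 < 0 then 1 else 0)) 255
    d.insert v (d.getD v 0 + 1)) PySem.Dict.empty

-- Source B: events[low+1].append(high) for 0 <= low <= 254
def pvEvents (group : List (Int × Int)) : PySem.Dict Int (List Int) :=
  group.foldl (fun d p =>
    if 0 ≤ p.2 ∧ p.2 ≤ 254 then d.modify (p.2 + 1) [] (· ++ [p.1]) else d) PySem.Dict.empty

-- Source B: one guess of the sweep: apply this guess's flip events, then table.append(distinct)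
def pvStep (events : PySem.Dict Int (List Int)) (st : PySem.Dict Int Int × Int × List Int) (guess : Int) :
    PySem.Dict Int Int × Int × List Int :=
  let fd := (events.getD guess []).foldl pvFlip (st.1, st.2.1)
  (fd.1, fd.2, st.2.2 ++ [fd.2])

-- Source B: _group_table
def pvGroupTable (group : List (Int × Int)) : List Int :=
  ((PySem.List.pyRange 0 256 1).foldl (pvStep (pvEvents group))
    (pvInitCnt group, ((pvInitCnt group).size : Int), [])).2.2

def sampled_low_score_table_from_decoded_alt (decoded_groups : List (List (Int × Int))) : List (Int × Int) :=
  let totals := decoded_groups.foldl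
    (fun totals group => ((totals.zip (pvGroupTable group)).map (fun q => q.1 + q.2)))
    (PySem.List.pyRepeat [(0 : Int)] 256)
  totals.zip (PySem.List.pyRange 0 256 1)

-- ===== PRECONDITION & SPEC =====
def Spec_sampled_low_score_table_from_decoded (decoded_groups : List (List (Int × Int))) (out : List (Int × Int)) : Prop := out = sampled_low_score_table_from_decoded_alt decoded_groups
instance (decoded_groups : List (List (Int × Int))) (out : List (Int × Int)) : Decidable (Spec_sampled_low_score_table_from_decoded decoded_groups out) := by unfold Spec_sampled_low_score_table_from_decoded; infer_instance

-- ===== CLAIM (what is proved, stated in full; the proofs are below) =====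
def Claim_equal_sampled_low_score_table_from_decoded : Prop := ∀ (decoded_groups : List (List (Int × Int))), Dom_sampled_low_score_table_from_decoded decoded_groups → Spec_sampled_low_score_table_from_decoded decoded_groups (sampled_low_score_table_from_decoded decoded_groups)

-- ===== LEMMAS AND PROOFS =====

-- the masked value an element contributes at a given guess
def fAt (g : Int) (p : Int × Int) : Int := PySem.Int.band (p.1 - (if p.2 < g then 1 else 0)) 255
-- the multiset of contributed values of a group at a given guess
def mAt (g : Int) (group : List (Int × Int)) : Multiset Int := (group.map (fAt g) : Multiset Int)
-- the group's score at a given guess: number of distinct contributed values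
def dAt (g : Int) (group : List (Int × Int)) : Int := ((mAt g group).toFinset.card : Int)
-- the (counter, distinct) state of B's sweep represents a multiset of values
def RepP (cnt : PySem.Dict Int Int) (d : Int) (m : Multiset Int) : Prop :=
  (∀ v, cnt.getD v 0 = (m.count v : Int)) ∧ d = (m.toFinset.card : Int)
-- the highs whose borrow flips at guess g, in group order
def esL (g : Int) (group : List (Int × Int)) : List Int :=
  (group.filter (fun p => decide (0 ≤ p.2 ∧ p.2 ≤ 254) && (p.2 + 1 == g))).map (·.1)

theorem pv_band255 (a : Int) : PySem.Int.band a 255 = a % 256 := by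
  unfold PySem.Int.band
  split_ifs with h1 h2 h3
  · have : a.toNat &&& (255:Int).toNat = a.toNat % 256 := by
      have := Nat.and_two_pow_sub_one_eq_mod a.toNat 8
      simpa using this
    rw [this]; omega
  · omega
  · have : (255:Int).toNat &&& (-a-1).toNat = (-a-1).toNat % 256 := by
      have := Nat.and_two_pow_sub_one_eq_mod (-a-1).toNat 8
      simpa [Nat.and_comm] using this
    rw [this]; omega
  · omega

theorem pv_setLen_eq_card (L : List Int) :
    ((PySem.Set.ofList L).length : Int) = (((L : Multiset Int).toFinset.card : Nat) : Int) := by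
  rw [List.toFinset_coe, List.card_toFinset]
  have hperm : (PySem.Set.ofList L).Perm L.dedup := by
    rw [List.perm_ext_iff_of_nodup (PySem.Set.nodup_ofList L) L.nodup_dedup]
    intro a; rw [PySem.Set.mem_ofList, List.mem_dedup]
  rw [hperm.length_eq]

theorem pv_countErase (m : Multiset Int) (a b : Int) :
    (m.erase b).count a = if a = b then m.count a - 1 else m.count a := by
  split_ifs with h
  · subst h; exact Multiset.count_erase_self a m
  · exact Multiset.count_erase_of_ne h m

theorem pv_cardFlip (m : Multiset Int) (old nw : Int) (hmem : old ∈ m) (hne : nw ≠ old) :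
    (((nw ::ₘ m.erase old).toFinset.card : Nat) : Int)
      = (m.toFinset.card : Int) - (if m.count old = 1 then 1 else 0)
        + (if m.count nw = 0 then 1 else 0) := by
  have holdfin : old ∈ m.toFinset := Multiset.mem_toFinset.mpr hmem
  have hc1 : (1:Nat) ≤ m.toFinset.card := Finset.card_pos.mpr ⟨old, holdfin⟩
  rw [Multiset.toFinset_cons]
  by_cases h1 : m.count old = 1
  · have he : (m.erase old).toFinset = m.toFinset.erase old := by
      ext v
      simp only [Multiset.mem_toFinset, Finset.mem_erase, ← Multiset.count_pos, pv_countErase]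
      split_ifs with h
      · subst h; omega
      · simp only [ne_eq, h, not_false_iff, true_and]
    rw [he]
    by_cases h2 : m.count nw = 0
    · have hnot : nw ∉ m.toFinset.erase old := by
        simp only [Finset.mem_erase, Multiset.mem_toFinset, ← Multiset.count_pos, h2]
        omega
      rw [Finset.card_insert_of_notMem hnot, Finset.card_erase_of_mem holdfin]
      split_ifs <;> omega
    · have hin : nw ∈ m.toFinset.erase old := by
        simp only [Finset.mem_erase, Multiset.mem_toFinset, ← Multiset.count_pos]
        exact ⟨hne, by omega⟩
      rw [Finset.insert_eq_self.mpr hin, Finset.card_erase_of_mem holdfin]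
      split_ifs <;> omega
  · have hpos : 1 ≤ m.count old := Multiset.one_le_count_iff_mem.mpr hmem
    have he : (m.erase old).toFinset = m.toFinset := by
      ext v
      simp only [Multiset.mem_toFinset, ← Multiset.count_pos, pv_countErase]
      split_ifs with h
      · subst h; omega
      · rfl
    rw [he]
    by_cases h2 : m.count nw = 0
    · have hnot : nw ∉ m.toFinset := by
        simp only [Multiset.mem_toFinset, ← Multiset.count_pos, h2]
        omega
      rw [Finset.card_insert_of_notMem hnot]
      split_ifs <;> omega
    · have hin : nw ∈ m.toFinset := by
        simp only [Multiset.mem_toFinset, ← Multiset.count_pos]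
        omega
      rw [Finset.insert_eq_self.mpr hin]
      split_ifs <;> omega

theorem pv_flipRep (cnt : PySem.Dict Int Int) (d : Int) (m : Multiset Int) (high : Int)
    (hrep : RepP cnt d m) (hmem : PySem.Int.band high 255 ∈ m) :
    RepP (pvFlip (cnt, d) high).1 (pvFlip (cnt, d) high).2
      (PySem.Int.band (high - 1) 255 ::ₘ m.erase (PySem.Int.band high 255)) := by
  obtain ⟨hc, hd⟩ := hrep
  have hne : PySem.Int.band (high - 1) 255 ≠ PySem.Int.band high 255 := by
    rw [pv_band255, pv_band255]; omega
  unfold pvFlip RepP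
  generalize hOLD : PySem.Int.band high 255 = old at hmem hne ⊢
  generalize hNW : PySem.Int.band (high - 1) 255 = nw at hne ⊢
  have hpos : 1 ≤ m.count old := Multiset.one_le_count_iff_mem.mpr hmem
  simp only [PySem.Dict.getD_insert, hc, if_neg hne]
  constructor
  · intro v
    simp only [Multiset.count_cons, pv_countErase]
    by_cases hv1 : v = nw
    · subst hv1
      simp only [if_pos rfl, if_neg hne]
      split_ifs <;> omega
    · by_cases hv2 : v = old
      · subst hv2
        simp only [if_neg hv1, if_pos rfl]
        split_ifs <;> omega
      · simp only [if_neg hv1, if_neg hv2]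
        omega
  · rw [pv_cardFlip m old nw hmem hne, hd]
    split_ifs <;> omega

theorem pv_eventsGetD (group : List (Int × Int)) (g : Int) :
    (pvEvents group).getD g [] = esL g group := by
  unfold pvEvents esL
  rw [PySem.List.foldl_ite_eq_foldl_filter (p := fun p : Int × Int => 0 ≤ p.2 ∧ p.2 ≤ 254)]
  rw [← List.foldl_map (f := fun p : Int × Int => (p.2 + 1, p.1))
        (g := fun (d : PySem.Dict Int (List Int)) (q : Int × Int) => d.modify q.1 [] (· ++ [q.2]))]
  rw [PySem.Dict.getD_foldl_modify_append]
  simp [List.filter_map, List.filter_filter, Function.comp_def, Bool.and_comm, Bool.and_left_comm]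

theorem pv_sweepStep (g : Int) (hg1 : 1 ≤ g) (hg2 : g ≤ 255) :
    ∀ (group : List (Int × Int)) (C : Multiset Int) (cnt : PySem.Dict Int Int) (d : Int),
    RepP cnt d (C + mAt (g - 1) group) →
    RepP ((esL g group).foldl pvFlip (cnt, d)).1 ((esL g group).foldl pvFlip (cnt, d)).2
      (C + mAt g group) := by
  intro group
  induction group with
  | nil => intro C cnt d h; simpa [esL, mAt] using h
  | cons p rest ih =>
    intro C cnt d h
    by_cases hcond : (0 ≤ p.2 ∧ p.2 ≤ 254) ∧ p.2 + 1 = g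
    · -- p flips at guess g: p.2 = g - 1
      have hp2 : p.2 = g - 1 := by omega
      have hold : fAt (g - 1) p = PySem.Int.band p.1 255 := by
        simp [fAt, hp2]
      have hnew : fAt g p = PySem.Int.band (p.1 - 1) 255 := by
        simp [fAt, hp2]
      have hes : esL g (p :: rest) = p.1 :: esL g rest := by
        simp [esL, hcond]
      have hm : C + mAt (g - 1) (p :: rest)
          = C + (PySem.Int.band p.1 255 ::ₘ mAt (g - 1) rest) := by
        simp [mAt, ← hold, ← Multiset.cons_coe]
      rw [hm] at h
      have hmem : PySem.Int.band p.1 255 ∈ C + (PySem.Int.band p.1 255 ::ₘ mAt (g - 1) rest) := by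
        simp
      have hflip := pv_flipRep cnt d _ p.1 h hmem
      have hms : PySem.Int.band (p.1 - 1) 255
            ::ₘ (C + (PySem.Int.band p.1 255 ::ₘ mAt (g - 1) rest)).erase (PySem.Int.band p.1 255)
          = (PySem.Int.band (p.1 - 1) 255 ::ₘ C) + mAt (g - 1) rest := by
        rw [Multiset.ext]
        intro a
        simp only [Multiset.count_cons, Multiset.count_add]
        rw [show ((C + (PySem.Int.band p.1 255 ::ₘ mAt (g - 1) rest)).erase (PySem.Int.band p.1 255)).count a
              = if a = PySem.Int.band p.1 255
                then (C + (PySem.Int.band p.1 255 ::ₘ mAt (g - 1) rest)).count a - 1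
                else (C + (PySem.Int.band p.1 255 ::ₘ mAt (g - 1) rest)).count a from by
          split_ifs with hh
          · subst hh; exact Multiset.count_erase_self _ _
          · exact Multiset.count_erase_of_ne hh _]
        simp only [Multiset.count_add, Multiset.count_cons]
        split_ifs <;> omega
      rw [hms] at hflip
      have := ih (PySem.Int.band (p.1 - 1) 255 ::ₘ C) (pvFlip (cnt, d) p.1).1 (pvFlip (cnt, d) p.1).2
        hflip
      rw [hes]
      simp only [List.foldl_cons]
      have hgoalm : (PySem.Int.band (p.1 - 1) 255 ::ₘ C) + mAt g rest = C + mAt g (p :: rest) := by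
        rw [Multiset.ext]; intro a
        simp [mAt, ← Multiset.cons_coe, hnew, Multiset.count_cons, Multiset.count_add]
      rw [hgoalm] at this
      exact this
    · -- p does not flip: its value is unchanged between g-1 and g
      have hsame : fAt (g - 1) p = fAt g p := by
        unfold fAt
        congr 1
        congr 1
        split_ifs with ha hb <;> first | rfl | omega
      have hes : esL g (p :: rest) = esL g rest := by
        simp only [esL, List.filter_cons]
        have : (decide (0 ≤ p.2 ∧ p.2 ≤ 254) && (p.2 + 1 == g)) = false := by
          simp only [Bool.and_eq_false_iff, decide_eq_false_iff_not, beq_eq_false_iff_ne]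
          omega
        rw [this]
        simp
      have hm : C + mAt (g - 1) (p :: rest) = (fAt g p ::ₘ C) + mAt (g - 1) rest := by
        rw [Multiset.ext]; intro a
        simp [mAt, ← Multiset.cons_coe, hsame, Multiset.count_cons, Multiset.count_add]
      rw [hm] at h
      have := ih (fAt g p ::ₘ C) cnt d h
      rw [hes]
      have hgoalm : (fAt g p ::ₘ C) + mAt g rest = C + mAt g (p :: rest) := by
        rw [Multiset.ext]; intro a
        simp [mAt, ← Multiset.cons_coe, Multiset.count_cons, Multiset.count_add]
      rw [hgoalm] at this
      exact this

theorem pv_initRep (group : List (Int × Int)) :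
    RepP (pvInitCnt group) ((pvInitCnt group).size : Int) (mAt 0 group) := by
  have hcnt : pvInitCnt group = PySem.Dict.counter (group.map (fAt 0)) := by
    unfold pvInitCnt
    rw [← PySem.Dict.foldl_insert_getD_add_one_eq_counter, List.foldl_map]
    rfl
  constructor
  · intro v
    rw [hcnt, PySem.Dict.getD_counter]
    simp [mAt, Multiset.coe_count]
  · have hkeys : (pvInitCnt group).size = (pvInitCnt group).keys.length := by
      simp [PySem.Dict.size, PySem.Dict.keys]
    rw [hkeys, hcnt, PySem.Dict.keys_counter]
    have := pv_setLen_eq_card (group.map (fAt 0))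
    simp only [mAt]
    omega

theorem pv_sweepAux (group : List (Int × Int)) :
    ∀ t : Nat, t ≤ 256 →
    RepP ((PySem.List.pyRange 0 (t : Int) 1).foldl (pvStep (pvEvents group))
            (pvInitCnt group, ((pvInitCnt group).size : Int), [])).1
         ((PySem.List.pyRange 0 (t : Int) 1).foldl (pvStep (pvEvents group))
            (pvInitCnt group, ((pvInitCnt group).size : Int), [])).2.1
         (mAt (max ((t : Int) - 1) 0) group) ∧
    ((PySem.List.pyRange 0 (t : Int) 1).foldl (pvStep (pvEvents group))
            (pvInitCnt group, ((pvInitCnt group).size : Int), [])).2.2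
      = (PySem.List.pyRange 0 (t : Int) 1).map (fun g => dAt g group) := by
  intro t
  induction t with
  | zero =>
    intro _
    rw [Nat.cast_zero, PySem.List.pyRange_one_eq_nil (by norm_num)]
    simp only [List.foldl_nil, List.map_nil]
    constructor
    · simpa using pv_initRep group
    · trivial
  | succ t ih =>
    intro ht
    have ht' : t ≤ 256 := by omega
    have hcast : ((t + 1 : Nat) : Int) = (t : Int) + 1 := by push_cast; ring
    rw [hcast, PySem.List.pyRange_one_succ_right (by positivity), List.foldl_append, List.map_append]
    obtain ⟨ihrep, ihtab⟩ := ih ht'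
    set St := (PySem.List.pyRange 0 (t : Int) 1).foldl (pvStep (pvEvents group))
            (pvInitCnt group, ((pvInitCnt group).size : Int), []) with hSt
    simp only [List.foldl_cons, List.foldl_nil, pvStep]
    rw [pv_eventsGetD]
    by_cases ht0 : t = 0
    · subst ht0
      have hes : esL ((0:Nat) : Int) group = [] := by
        rw [Nat.cast_zero]
        unfold esL
        rw [List.filter_eq_nil_iff.mpr ?_]
        · rfl
        · intro p _
          simp only [Bool.and_eq_true, decide_eq_true_eq, beq_iff_eq]
          omega
      rw [hes]
      simp only [List.foldl_nil, List.map_cons, List.map_nil]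
      constructor
      · have : max (((0:Nat) : Int) + 1 - 1) 0 = max (((0:Nat):Int) - 1) 0 := by norm_num
        rw [this]
        exact ihrep
      · rw [ihtab]
        congr 1
        have h2 := ihrep.2
        simp only [Nat.cast_zero] at h2 ⊢
        norm_num at h2
        simpa [dAt] using h2
    · have ht1 : (1 : Int) ≤ (t : Int) := by
        have : 1 ≤ t := Nat.one_le_iff_ne_zero.mpr ht0
        exact_mod_cast this
      have hmax : max ((t : Int) - 1) 0 = (t : Int) - 1 := by omega
      rw [hmax] at ihrep
      have hrep' : RepP St.1 St.2.1 (0 + mAt ((t:Int) - 1) group) := by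
        rwa [zero_add]
      have hstep := pv_sweepStep (t : Int) ht1 (by exact_mod_cast (by omega : t ≤ 255)) group 0 St.1 St.2.1 hrep'
      rw [zero_add] at hstep
      have hmax2 : max ((t : Int) + 1 - 1) 0 = (t : Int) := by omega
      rw [hmax2]
      refine ⟨hstep, ?_⟩
      rw [ihtab]
      simp only [List.map_cons, List.map_nil]
      congr 1
      have h2 := (hstep : RepP _ _ _).2
      simpa [dAt] using h2

theorem pv_groupTable (group : List (Int × Int)) :
    pvGroupTable group = (PySem.List.pyRange 0 256 1).map (fun g => dAt g group) := by
  have := (pv_sweepAux group 256 (le_refl _)).2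
  norm_num at this
  unfold pvGroupTable
  norm_num
  exact this

theorem pv_score (decoded_groups : List (List (Int × Int))) (g : Int) :
    sampled_output_stage_score_from_decoded decoded_groups g
      = (decoded_groups.map (fun gr => dAt g gr)).sum := by
  unfold sampled_output_stage_score_from_decoded
  have hbody : ∀ (total : Int) (group : List (Int × Int)),
      (fun total group =>
        let seen : PySem.Set Int := group.foldl (fun seen p =>
          let borrow : Int := if p.2 < g then 1 else 0
          PySem.Set.add seen (PySem.Int.band (p.1 - borrow) 255)) PySem.Set.empty
        total + PySem.Set.len seen) total group
      = total + dAt g group := by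
    intro total group
    simp only []
    congr 1
    have hseen : group.foldl (fun seen p =>
        PySem.Set.add seen (PySem.Int.band (p.1 - (if p.2 < g then 1 else 0)) 255)) PySem.Set.empty
        = PySem.Set.ofList (group.map (fAt g)) := by
      rw [← PySem.Set.update_map_eq_foldl_add (l := group)
        (f := fun p : Int × Int => PySem.Int.band (p.1 - (if p.2 < g then 1 else 0)) 255)
        (s := PySem.Set.empty)]
      show PySem.Set.update [] _ = _
      rw [PySem.Set.update_nil_left]
      rfl
    rw [hseen]
    unfold PySem.Set.len dAt mAt
    exact pv_setLen_eq_card (group.map (fAt g))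
  rw [show (fun (total : Int) (group : List (Int × Int)) =>
        let seen : PySem.Set Int := group.foldl (fun seen p =>
          let borrow : Int := if p.2 < g then 1 else 0
          PySem.Set.add seen (PySem.Int.band (p.1 - borrow) 255)) PySem.Set.empty
        total + PySem.Set.len seen)
      = fun total group => total + dAt g group from funext fun a => funext fun b => hbody a b]
  rw [PySem.List.foldl_add decoded_groups (fun gr => dAt g gr) 0, zero_add]

theorem pv_Aclosed (decoded_groups : List (List (Int × Int))) :
    sampled_low_score_table_from_decoded decoded_groups
      = (PySem.List.pyRange 0 256 1).map
          (fun g => ((decoded_groups.map (fun gr => dAt g gr)).sum, g)) := by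
  unfold sampled_low_score_table_from_decoded
  rw [PySem.List.foldl_append_singleton_eq_map
    (f := fun lg => (sampled_output_stage_score_from_decoded decoded_groups lg, lg))]
  rw [List.nil_append]
  apply List.map_congr_left
  intro g _
  rw [pv_score]

theorem pv_zipMapSelf {α β : Type} (R : List α) (w : α → β) :
    (R.map w).zip R = R.map (fun x => (w x, x)) := by
  induction R with
  | nil => rfl
  | cons a R ih => simp [ih]

theorem pv_totalsAux (groups : List (List (Int × Int))) :
    ∀ u : Int → Int,
    groups.foldl (fun tot gr => ((tot.zip (pvGroupTable gr)).map (fun q => q.1 + q.2)))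
        ((PySem.List.pyRange 0 256 1).map u)
      = (PySem.List.pyRange 0 256 1).map
          (fun g => u g + (groups.map (fun gr => dAt g gr)).sum) := by
  induction groups with
  | nil =>
    intro u
    simp
  | cons gr rest ih =>
    intro u
    simp only [List.foldl_cons]
    rw [pv_groupTable, List.zip_map', List.map_map]
    have : ((fun q : Int × Int => q.1 + q.2) ∘ fun a => (u a, dAt a gr))
        = fun a => u a + dAt a gr := rfl
    rw [this, ih (fun a => u a + dAt a gr)]
    apply List.map_congr_left
    intro g _
    simp [add_assoc]

theorem pv_Bclosed (decoded_groups : List (List (Int × Int))) :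
    sampled_low_score_table_from_decoded_alt decoded_groups
      = (PySem.List.pyRange 0 256 1).map
          (fun g => ((decoded_groups.map (fun gr => dAt g gr)).sum, g)) := by
  unfold sampled_low_score_table_from_decoded_alt
  have hinit : PySem.List.pyRepeat [(0 : Int)] 256
      = (PySem.List.pyRange 0 256 1).map (fun _ => (0 : Int)) := by
    rw [PySem.List.pyRepeat_singleton, List.map_const', PySem.List.length_pyRange_one]
    norm_num
  rw [hinit, pv_totalsAux decoded_groups (fun _ => 0)]
  simp only []
  rw [pv_zipMapSelf]
  apply List.map_congr_left
  intro g _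
  simp

-- ===== VERDICT (by name: the statement is the Claim_ definition above) =====
theorem sampled_low_score_table_from_decoded_spec : Claim_equal_sampled_low_score_table_from_decoded := by
  intro decoded_groups _
  unfold Spec_sampled_low_score_table_from_decoded
  rw [pv_Aclosed, pv_Bclosed]
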